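-- pv_equiv track=rewrite | github.com/zskulcsar/code-duplication-scanner | src/obfuscation/mapper.py | _next_symbol_name
-- ===== SOURCE A (Python) =====
-- def _next_symbol_name(blocked_names: set[str], generated_names: set[str]) -> str:
--     """Generate the next deterministic obfuscated symbol.
--
--     Args:
--         blocked_names: Names that cannot be used.
--         generated_names: Already generated obfuscated names.
--
--     Returns:
--         Next available obfuscated name.
--     """
--     counter = 0
--     while True:
--         candidate = _alphabetic_name(counter)
--         counter += 1
--         if candidate in blocked_names:
--             continue
--         if candidate in generated_names:
--             continue
--         return candidate
--
-- def _alphabetic_name(counter: int) -> str: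
--     """Generate deterministic alphabetic identifier from integer counter.
--
--     Args:
--         counter: Zero-based integer index.
--
--     Returns:
--         Alphabetic identifier in base-26 lowercase.
--     """
--     alphabet = "abcdefghijklmnopqrstuvwxyz"
--     index = counter
--     chars: list[str] = []
--     while True:
--         chars.append(alphabet[index % 26])
--         index = index // 26 - 1
--         if index < 0:
--             break
--     return "".join(reversed(chars))
-- ===== SOURCE B (Python) =====
-- def _next_symbol_name(blocked_names: set[str], generated_names: set[str]) -> str:
--     """Generate the next deterministic obfuscated symbol.
--
--     Enumerates candidate names directly, level by level (all length-1 names in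
--     lexicographic order, then all length-2 names, ...), which is exactly the
--     sequence a, b, ..., z, aa, ab, ... that bijective base-26 counting yields,
--     and returns the first candidate not blocked and not already generated.
--     """
--     alphabet = "abcdefghijklmnopqrstuvwxyz"
--     prefixes = [""]
--     while True:
--         prefixes = [p + ch for p in prefixes for ch in alphabet]
--         for candidate in prefixes:
--             if candidate in blocked_names:
--                 continue
--             if candidate in generated_names:
--                 continue
--             return candidate
-- ===== Notes on version B (the rewrite author's own statement) =====
-- stated objective: idiomatic
-- what changed: Replaces the integer counter plus bijective base-26 digit conversion with direct level-by-level lexicographic enumeration of candidate names (build all names of length 1, then 2, ...), returning the first one not blocked or generated; no counter arithmetic or digit/reverse juggling remains.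
import Mathlib
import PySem

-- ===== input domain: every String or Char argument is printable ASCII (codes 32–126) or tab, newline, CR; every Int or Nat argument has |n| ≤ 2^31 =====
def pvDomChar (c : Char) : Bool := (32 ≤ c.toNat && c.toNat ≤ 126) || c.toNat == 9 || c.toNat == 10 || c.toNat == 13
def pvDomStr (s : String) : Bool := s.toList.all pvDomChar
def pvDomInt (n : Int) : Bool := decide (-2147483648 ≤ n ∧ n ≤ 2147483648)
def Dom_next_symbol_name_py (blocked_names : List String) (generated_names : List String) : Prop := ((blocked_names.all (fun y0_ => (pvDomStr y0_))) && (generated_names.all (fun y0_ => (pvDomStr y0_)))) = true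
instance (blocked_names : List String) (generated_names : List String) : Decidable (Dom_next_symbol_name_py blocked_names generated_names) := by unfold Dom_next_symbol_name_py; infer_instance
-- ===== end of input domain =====

-- B replaces the counter + bijective-base-26 digit conversion with direct level-by-level
-- lexicographic enumeration of candidate names (idiomatic; same candidate sequence, proved below).

-- ===== PORT A =====
def pvAlphabet : List Char := ['a','b','c','d','e','f','g','h','i','j','k','l','m','n','o','p','q','r','s','t','u','v','w','x','y','z']

-- _alphabetic_name's while-loop: chars.append(alphabet[index % 26]); index = index // 26 - 1; break if index < 0.
-- index % 26 < 26 always, so alphabet[index % 26] is exactly pvAlphabet.getD (index % 26) 'a';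
-- over Nat, "index // 26 - 1 < 0" is "index < 26".
def pvAlphaAux (index : Nat) (chars : List Char) : List Char :=
  if _h : index < 26 then chars ++ [pvAlphabet.getD (index % 26) 'a']
  else pvAlphaAux (index / 26 - 1) (chars ++ [pvAlphabet.getD (index % 26) 'a'])
termination_by index
decreasing_by omega

-- "".join(reversed(chars))
def pvAlphabeticName (counter : Nat) : String := String.ofList (pvAlphaAux counter []).reverse

-- the while True loop of _next_symbol_name; fuel |blocked|+|generated|+1 always suffices (proved
-- below by pigeonhole: that many initial candidates are pairwise distinct), so 0-fuel is unreachable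
def pvALoop (b g : List String) (counter fuel : Nat) : String :=
  match fuel with
  | 0 => ""
  | f+1 =>
    let candidate := pvAlphabeticName counter
    if b.contains candidate then pvALoop b g (counter+1) f
    else if g.contains candidate then pvALoop b g (counter+1) f
    else candidate

def next_symbol_name_py (blocked_names : List String) (generated_names : List String) : String :=
  pvALoop blocked_names generated_names 0 (blocked_names.length + generated_names.length + 1)

-- ===== PORT B =====
-- prefixes = [p + ch for p in prefixes for ch in alphabet]
def pvStep (prefixes : List String) : List String :=
  prefixes.flatMap (fun p => pvAlphabet.map (fun ch => p.push ch))

-- the while True loop of B; same fuel bound, same reason (each round of B scans a whole level)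
def pvBLoop (b g : List String) (prefixes : List String) (fuel : Nat) : String :=
  match fuel with
  | 0 => ""
  | f+1 =>
    let prefixes' := pvStep prefixes
    match prefixes'.find? (fun c => !(b.contains c) && !(g.contains c)) with
    | some c => c
    | none => pvBLoop b g prefixes' f

def next_symbol_name_py_alt (blocked_names : List String) (generated_names : List String) : String :=
  pvBLoop blocked_names generated_names [""] (blocked_names.length + generated_names.length + 1)

-- ===== PRECONDITION & SPEC =====
def Spec_next_symbol_name_py (blocked_names : List String) (generated_names : List String) (out : String) : Prop := out = next_symbol_name_py_alt blocked_names generated_names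
instance (blocked_names : List String) (generated_names : List String) (out : String) : Decidable (Spec_next_symbol_name_py blocked_names generated_names out) := by unfold Spec_next_symbol_name_py; infer_instance

-- ===== CLAIM (what is proved, stated in full; the proofs are below) =====
def Claim_equal_next_symbol_name_py : Prop := ∀ (blocked_names : List String) (generated_names : List String), Dom_next_symbol_name_py blocked_names generated_names → Spec_next_symbol_name_py blocked_names generated_names (next_symbol_name_py blocked_names generated_names)

-- ===== LEMMAS AND PROOFS =====

-- level n of B's enumeration: all length-n names in lexicographic order
def pvLvl : Nat → List String
  | 0 => [""]
  | n+1 => pvStep (pvLvl n)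

-- number of names of length ≤ n
def pvS : Nat → Nat
  | 0 => 0
  | n+1 => 26 * (pvS n + 1)

-- concatenation of levels m, m+1, …, m+f-1
def pvECat : Nat → Nat → List String
  | _, 0 => []
  | m, f+1 => pvLvl m ++ pvECat (m+1) f

lemma pvS_zero : pvS 0 = 0 := rfl

lemma pvS_succ (l : Nat) : pvS l + 26^(l+1) = pvS (l+1) := by
  induction l with
  | zero => simp [pvS]
  | succ l ih => simp only [pvS, pow_succ] at *; omega

lemma pvS_ge (l : Nat) : l ≤ pvS l := by
  induction l with
  | zero => simp [pvS]
  | succ l ih => simp only [pvS]; omega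

lemma pvS_le_succ (b : Nat) : pvS b ≤ pvS (b+1) := by
  have h : pvS (b+1) = 26 * (pvS b + 1) := rfl
  omega

lemma pvS_mono {a b : Nat} (h : a ≤ b) : pvS a ≤ pvS b := by
  induction b with
  | zero => have : a = 0 := by omega
            simp [this]
  | succ b ihb =>
    rcases Nat.lt_or_ge a (b+1) with h' | h'
    · exact le_trans (ihb (by omega)) (pvS_le_succ b)
    · have : a = b + 1 := by omega
      simp [this]

lemma range1_append (s m n : Nat) : List.range' s m ++ List.range' (s+m) n = List.range' s (m+n) := by
  induction m generalizing s with
  | zero => simp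
  | succ m ih =>
    rw [List.range'_succ (s := s) (n := m), List.cons_append,
        show s + (m + 1) = (s + 1) + m by omega, ih (s+1),
        show m + 1 + n = (m + n) + 1 by omega, List.range'_succ (s := s) (n := m + n)]

lemma aux_small (i : Nat) (h : i < 26) (chars : List Char) :
    pvAlphaAux i chars = chars ++ [pvAlphabet.getD (i % 26) 'a'] := by
  rw [pvAlphaAux]; simp [h]

lemma aux_big (i : Nat) (h : 26 ≤ i) (chars : List Char) :
    pvAlphaAux i chars = pvAlphaAux (i / 26 - 1) (chars ++ [pvAlphabet.getD (i % 26) 'a']) := by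
  rw [pvAlphaAux]; simp [Nat.not_lt.mpr h]

lemma aux_acc (i : Nat) : ∀ chars, pvAlphaAux i chars = chars ++ pvAlphaAux i [] := by
  induction i using Nat.strong_induction_on with
  | _ i ih =>
    intro chars
    by_cases h : i < 26
    · rw [aux_small i h, aux_small i h]; simp
    · have h' : 26 ≤ i := by omega
      rw [aux_big i h', aux_big i h', ih (i/26-1) (by omega), ih (i/26-1) (by omega) ([] ++ _)]
      simp

-- the result of _alphabetic_name's loop, already reversed
def pvAlphaList (c : Nat) : List Char := (pvAlphaAux c []).reverse

lemma alphaList_small (i : Nat) (h : i < 26) : pvAlphaList i = [pvAlphabet.getD i 'a'] := by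
  rw [pvAlphaList, aux_small i h]
  simp [Nat.mod_eq_of_lt h]

lemma alphaList_big (i : Nat) (h : 26 ≤ i) :
    pvAlphaList i = pvAlphaList (i / 26 - 1) ++ [pvAlphabet.getD (i % 26) 'a'] := by
  rw [pvAlphaList, aux_big i h, aux_acc (i/26-1)]
  simp [pvAlphaList]

lemma alphaName_eq (c : Nat) : pvAlphabeticName c = String.ofList (pvAlphaList c) := rfl

lemma ofList_concat (l : List Char) (c : Char) : String.ofList (l ++ [c]) = (String.ofList l).push c := by
  rw [← String.toList_inj]
  simp

lemma letter_inj' : ∀ d < 26, ∀ d' < 26, pvAlphabet.getD d 'a' = pvAlphabet.getD d' 'a' → d = d' := by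
  decide

lemma letter_inj (d d' : Nat) (hd : d < 26) (hd' : d' < 26)
    (h : pvAlphabet.getD d 'a' = pvAlphabet.getD d' 'a') : d = d' := letter_inj' d hd d' hd' h

lemma alphaList_ne_nil (i : Nat) : pvAlphaList i ≠ [] := by
  by_cases h : i < 26
  · simp [alphaList_small i h]
  · simp [alphaList_big i (by omega)]

lemma alphaList_inj : ∀ i j, pvAlphaList i = pvAlphaList j → i = j := by
  intro i
  induction i using Nat.strong_induction_on with
  | _ i ih =>
    intro j h
    by_cases hi : i < 26 <;> by_cases hj : j < 26
    · rw [alphaList_small i hi, alphaList_small j hj] at h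
      exact letter_inj i j hi hj (by simpa using h)
    · rw [alphaList_small i hi, alphaList_big j (by omega)] at h
      have hlen := congrArg List.length h
      simp at hlen
      exact absurd hlen (alphaList_ne_nil (j/26-1))
    · rw [alphaList_big i (by omega), alphaList_small j hj] at h
      have hlen := congrArg List.length h
      simp at hlen
      exact absurd hlen (alphaList_ne_nil (i/26-1))
    · have hi' : 26 ≤ i := by omega
      have hj' : 26 ≤ j := by omega
      rw [alphaList_big i hi', alphaList_big j hj'] at h
      have h2 := List.append_inj' h (by simp)
      have hq : i / 26 - 1 = j / 26 - 1 := ih (i/26-1) (by omega) _ h2.1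
      have hd : i % 26 = j % 26 :=
        letter_inj _ _ (Nat.mod_lt _ (by norm_num)) (Nat.mod_lt _ (by norm_num))
          (by simpa using h2.2)
      omega

lemma alphaName_inj : Function.Injective pvAlphabeticName := by
  intro i j h
  rw [alphaName_eq, alphaName_eq, String.ofList_inj] at h
  exact alphaList_inj i j h

lemma map_getD_range : (List.range' 0 26).map (fun i => pvAlphabet.getD i 'a') = pvAlphabet := by
  decide

-- base: the first 26 counters yield exactly level 1
lemma key_base : (List.range' 0 26).map pvAlphabeticName = pvLvl 1 := by
  have h2 : pvLvl 1 = pvAlphabet.map (fun ch => "".push ch) := by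
    simp [pvLvl, pvStep]
  rw [h2, ← map_getD_range, List.map_map]
  apply List.map_congr_left
  intro i hi
  have hi26 : i < 26 := by simpa using (List.mem_range'_1.mp hi).2
  rw [alphaName_eq, alphaList_small i hi26]
  simp only [Function.comp_apply]
  rw [← String.toList_inj]
  simp

lemma alpha_block (q d : Nat) (hd : d < 26) :
    pvAlphabeticName (26*(q+1)+d) = (pvAlphabeticName q).push (pvAlphabet.getD d 'a') := by
  have h26 : 26 ≤ 26*(q+1)+d := by omega
  have hdiv : (26*(q+1)+d) / 26 - 1 = q := by omega
  have hmod : (26*(q+1)+d) % 26 = d := by omega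
  rw [alphaName_eq, alphaList_big _ h26, hdiv, hmod, ofList_concat, ← alphaName_eq]

lemma range'_blocks : ∀ n m, List.range' (26*m) (26*n) = (List.range' m n).flatMap (fun p => List.range' (26*p) 26) := by
  intro n
  induction n with
  | zero => simp
  | succ n ih =>
    intro m
    rw [List.range'_succ (s := m) (n := n), List.flatMap_cons, ← ih (m+1)]
    have h1 : 26*(n+1) = 26 + 26*n := by ring
    have h2 : 26*(m+1) = 26*m + 26 := by ring
    rw [h1, ← range1_append (26*m) 26 (26*n), h2]

lemma map_alpha_block (q : Nat) :
    (List.range' (26*(q+1)) 26).map pvAlphabeticName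
      = pvAlphabet.map (fun ch => (pvAlphabeticName q).push ch) := by
  have h : List.range' (26*(q+1)) 26 = (List.range' 0 26).map (fun d => 26*(q+1)+d) := by
    rw [List.range'_eq_map_range, List.range'_eq_map_range, List.map_map]
    congr 1
    funext d
    simp only [Function.comp_apply]
    omega
  rw [h, List.map_map, ← map_getD_range, List.map_map]
  apply List.map_congr_left
  intro d hd
  have hd26 : d < 26 := by simpa using (List.mem_range'_1.mp hd).2
  simp only [Function.comp_apply]
  rw [alpha_block q d hd26]

lemma key_lemma : ∀ l, (List.range' (pvS l) (26^(l+1))).map pvAlphabeticName = pvLvl (l+1) := by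
  intro l
  induction l with
  | zero => simpa [pvS] using key_base
  | succ l ih =>
    have hS : pvS (l+1) = 26 * (pvS l + 1) := rfl
    have hP : (26:Nat)^(l+1+1) = 26 * 26^(l+1) := by rw [pow_succ]; ring
    have hsh : List.range' (pvS l + 1) (26^(l+1)) = (List.range' (pvS l) (26^(l+1))).map (fun x => x + 1) := by
      rw [List.range'_eq_map_range, List.range'_eq_map_range, List.map_map]
      congr 1
      funext x
      simp only [Function.comp_apply]
      omega
    rw [hS, hP, range'_blocks (26^(l+1)) (pvS l + 1), hsh, List.map_flatMap, List.flatMap_map]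
    have hRHS : pvLvl (l+1+1) = pvStep (pvLvl (l+1)) := rfl
    rw [hRHS, ← ih, pvStep, List.flatMap_map]
    apply List.flatMap_congr
    intro q _
    exact map_alpha_block q

-- A's loop scans candidates counter, counter+1, …
lemma aLoop_eq (b g : List String) : ∀ f counter,
    pvALoop b g counter f
      = (((List.range' counter f).map pvAlphabeticName).find? (fun c => !(b.contains c) && !(g.contains c))).getD "" := by
  intro f
  induction f with
  | zero => intro c; simp [pvALoop]
  | succ f ih =>
    intro c
    rw [List.range'_succ (s := c) (n := f), List.map_cons, List.find?_cons]
    by_cases hb : pvAlphabeticName c ∈ b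
    · simp [pvALoop, hb, ih]
    · by_cases hg : pvAlphabeticName c ∈ g
      · simp [pvALoop, hb, hg, ih]
      · simp [pvALoop, hb, hg]

-- B's loop scans levels n+1, n+2, …
lemma bLoop_eq (b g : List String) : ∀ f n,
    pvBLoop b g (pvLvl n) f
      = ((pvECat (n+1) f).find? (fun c => !(b.contains c) && !(g.contains c))).getD "" := by
  intro f
  induction f with
  | zero => intro n; simp [pvBLoop, pvECat]
  | succ f ih =>
    intro n
    rw [show pvECat (n+1) (f+1) = pvLvl (n+1) ++ pvECat (n+2) f from rfl, List.find?_append]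
    show (match (pvStep (pvLvl n)).find? (fun c => !(b.contains c) && !(g.contains c)) with
          | some c => c
          | none => pvBLoop b g (pvStep (pvLvl n)) f) = _
    rw [show pvStep (pvLvl n) = pvLvl (n+1) from rfl]
    cases hfind : (pvLvl (n+1)).find? (fun c => !(b.contains c) && !(g.contains c)) with
    | some c => simp
    | none => simpa using ih (n+1)

-- the concatenated levels are exactly A's candidate sequence
lemma ecat_eq : ∀ f l, pvECat (l+1) f = (List.range' (pvS l) (pvS (l+f) - pvS l)).map pvAlphabeticName := by
  intro f
  induction f with
  | zero => intro l; simp [pvECat]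
  | succ f ih =>
    intro l
    rw [show pvECat (l+1) (f+1) = pvLvl (l+1) ++ pvECat (l+2) f from rfl, ih (l+1), ← key_lemma l,
        ← List.map_append]
    congr 1
    have h1 := pvS_succ l
    have h2 : pvS (l+1) ≤ pvS (l+1+f) := pvS_mono (by omega)
    have happ := range1_append (pvS l) (26^(l+1)) (pvS (l+1+f) - pvS (l+1))
    rw [h1] at happ
    rw [happ, show l + (f + 1) = l + 1 + f by omega]
    have hp : 0 < (26:Nat)^(l+1) := pow_pos (by norm_num) _
    congr 1
    omega

-- pigeonhole: among the first |b|+|g|+1 (pairwise distinct) candidates one is free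
lemma find_some (b g : List String) :
    ∃ c, ((List.range' 0 (b.length + g.length + 1)).map pvAlphabeticName).find?
            (fun c => !(b.contains c) && !(g.contains c)) = some c := by
  set K := b.length + g.length + 1 with hK
  cases hfind : ((List.range' 0 K).map pvAlphabeticName).find? (fun c => !(b.contains c) && !(g.contains c)) with
  | some c => exact ⟨c, rfl⟩
  | none =>
    exfalso
    have hall := List.find?_eq_none.mp hfind
    have hsub : (List.range' 0 K).map pvAlphabeticName ⊆ b ++ g := by
      intro x hx
      have hx' := hall x hx
      simp at hx'
      by_cases hxb : x ∈ b
      · exact List.mem_append.mpr (Or.inl hxb)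
      · exact List.mem_append.mpr (Or.inr (hx' hxb))
    have hnd : ((List.range' 0 K).map pvAlphabeticName).Nodup :=
      (List.nodup_range' 1 (by norm_num)).map alphaName_inj
    have hlen := (hnd.subperm hsub).length_le
    simp at hlen
    omega

-- ===== VERDICT (by name: the statement is the Claim_ definition above) =====
theorem next_symbol_name_py_spec : Claim_equal_next_symbol_name_py := by
  unfold Claim_equal_next_symbol_name_py
  intro b g _
  unfold Spec_next_symbol_name_py next_symbol_name_py next_symbol_name_py_alt
  set K := b.length + g.length + 1 with hK
  obtain ⟨c, hc⟩ := find_some b g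
  rw [← hK] at hc
  rw [aLoop_eq b g K 0, show ([""] : List String) = pvLvl 0 from rfl, bLoop_eq b g K 0, ecat_eq K 0]
  simp only [Nat.zero_add, pvS_zero, Nat.sub_zero]
  have hKS : K ≤ pvS K := pvS_ge K
  have hsplit : List.range' 0 (pvS K) = List.range' 0 K ++ List.range' K (pvS K - K) := by
    have happ := range1_append 0 K (pvS K - K)
    rw [show K + (pvS K - K) = pvS K by omega] at happ
    rw [show (0:Nat) + K = K from Nat.zero_add K] at happ
    exact happ.symm
  rw [hsplit, List.map_append, hc, List.find?_append, hc]
  simp
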